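-- pv_equiv track=rewrite | github.com/pypi-data/pypi-mirror-312 | packages/mircat-stats/mircat_stats-0.1.4.1-py3-none-any.whl/mircat_stats/statistics/aorta.py | _define_aortic_arch_with_seg
-- ===== SOURCE A (Python) =====
-- def _define_aortic_arch_with_seg(cpr):
--     aorta_label = 1
--     brach_label = 2
--     subclavian_label = 3
--     brach_start = 0
--     subclavian_end = 0
--     cpr_length = len(cpr)
--     # First find the first instance of the brachiocephalic trunk
--     for slice_idx, cross_section in enumerate(cpr):
--         if brach_label in cross_section:
--             brach_start = slice_idx
--             break
--     # Now find the last instance of the subclavian artery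
--     for slice_idx, cross_section in enumerate(cpr[::-1]):  # Go through in reverse so first appearance == last instance
--         if subclavian_label in cross_section:
--             subclavian_end = cpr_length - slice_idx
--             break
--     return brach_start, subclavian_end, aorta_label
-- ===== SOURCE B (Python) =====
-- def _define_aortic_arch_with_seg(cpr):
--     brach_start = 0
--     subclavian_end = 0
--     brach_found = False
--     # single forward pass: first occurrence of label 2, last occurrence of label 3
--     for i, cross_section in enumerate(cpr):
--         if not brach_found and 2 in cross_section:
--             brach_start = i
--             brach_found = True
--         if 3 in cross_section:
--             subclavian_end = i + 1
--     return brach_start, subclavian_end, 1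
-- ===== Notes on version B (the rewrite author's own statement) =====
-- stated objective: alternative
-- what changed: Replaced the two separate scans (forward break-search for label 2 and a scan of the reversed list for label 3) by a single forward pass that tracks the first label-2 index with a found-flag and overwrites a running last-seen index+1 for label 3, eliminating the list reversal.
import Mathlib
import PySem

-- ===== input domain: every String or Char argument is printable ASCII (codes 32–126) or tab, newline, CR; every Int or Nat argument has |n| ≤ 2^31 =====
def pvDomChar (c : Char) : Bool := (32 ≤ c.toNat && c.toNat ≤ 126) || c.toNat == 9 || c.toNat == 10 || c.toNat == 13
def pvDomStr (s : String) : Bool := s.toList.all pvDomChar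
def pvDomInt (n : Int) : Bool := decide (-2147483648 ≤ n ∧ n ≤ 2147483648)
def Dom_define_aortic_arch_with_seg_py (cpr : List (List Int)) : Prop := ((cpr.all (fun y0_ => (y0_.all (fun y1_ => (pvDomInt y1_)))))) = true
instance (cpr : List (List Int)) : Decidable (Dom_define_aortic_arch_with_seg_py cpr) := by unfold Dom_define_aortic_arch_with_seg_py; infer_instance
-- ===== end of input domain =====

-- B replaces A's two break-loops (one over the reversed list) by one forward pass
-- tracking first label-2 index and last label-3 index; same values, similar cost (objective: alternative).

-- ===== PORT A =====
-- first loop: 'for slice_idx, cross_section in enumerate(cpr): if 2 in cross_section: brach_start = slice_idx; break'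
-- (enumerate ported as a carried index; default brach_start = 0)
def pvALoop1 : List (List Int) → Int → Int
  | [], _ => 0
  | cs :: rest, i => if cs.contains 2 then i else pvALoop1 rest (i + 1)

-- second loop over cpr[::-1] (reversal ported as List.reverse, exact for step -1 full slice):
-- 'if 3 in cross_section: subclavian_end = cpr_length - slice_idx; break' (default 0)
def pvALoop2 : List (List Int) → Int → Int → Int
  | [], _, _ => 0
  | cs :: rest, i, n => if cs.contains 3 then n - i else pvALoop2 rest (i + 1) n

def define_aortic_arch_with_seg_py (cpr : List (List Int)) : Int × Int × Int :=
  let cpr_length : Int := (cpr.length : Int)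
  (pvALoop1 cpr 0, pvALoop2 cpr.reverse 0 cpr_length, 1)

-- ===== PORT B =====
-- single forward pass, state (index, brach_found, brach_start, subclavian_end)
def pvBLoop : List (List Int) → Int → Bool → Int → Int → Int × Int
  | [], _, _, bs, se => (bs, se)
  | cs :: rest, i, found, bs, se =>
    let bs' := if !found && cs.contains 2 then i else bs
    let found' := found || cs.contains 2
    let se' := if cs.contains 3 then i + 1 else se
    pvBLoop rest (i + 1) found' bs' se'

def define_aortic_arch_with_seg_py_alt (cpr : List (List Int)) : Int × Int × Int :=
  let r := pvBLoop cpr 0 false 0 0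
  (r.1, r.2, 1)

-- ===== PRECONDITION & SPEC =====
def Spec_define_aortic_arch_with_seg_py (cpr : List (List Int)) (out : Int × Int × Int) : Prop := out = define_aortic_arch_with_seg_py_alt cpr
instance (cpr : List (List Int)) (out : Int × Int × Int) : Decidable (Spec_define_aortic_arch_with_seg_py cpr out) := by unfold Spec_define_aortic_arch_with_seg_py; infer_instance

-- ===== CLAIM (what is proved, stated in full; the proofs are below) =====
def Claim_equal_define_aortic_arch_with_seg_py : Prop := ∀ (cpr : List (List Int)), Dom_define_aortic_arch_with_seg_py cpr → Spec_define_aortic_arch_with_seg_py cpr (define_aortic_arch_with_seg_py cpr)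

-- ===== LEMMAS AND PROOFS =====

-- subclavian part of B's state machine, isolated
def pvSub : List (List Int) → Int → Int → Int
  | [], _, se => se
  | cs :: rest, i, se => pvSub rest (i + 1) (if cs.contains 3 then i + 1 else se)

theorem pvBLoop_fst_found : ∀ (l : List (List Int)) (i bs se : Int),
    (pvBLoop l i true bs se).1 = bs := by
  intro l
  induction l with
  | nil => intro i bs se; rfl
  | cons cs rest ih => intro i bs se; simp [pvBLoop, ih]

theorem pvBLoop_fst : ∀ (l : List (List Int)) (i se : Int),
    (pvBLoop l i false 0 se).1 = pvALoop1 l i := by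
  intro l
  induction l with
  | nil => intro i se; rfl
  | cons cs rest ih =>
    intro i se
    by_cases h2 : (2 : Int) ∈ cs
    · simp [pvBLoop, pvALoop1, h2, pvBLoop_fst_found]
    · simp [pvBLoop, pvALoop1, h2, ih]

theorem pvBLoop_snd : ∀ (l : List (List Int)) (i : Int) (f : Bool) (bs se : Int),
    (pvBLoop l i f bs se).2 = pvSub l i se := by
  intro l
  induction l with
  | nil => intros; rfl
  | cons cs rest ih => intro i f bs se; simp [pvBLoop, pvSub, ih]

theorem pvSub_none : ∀ (l : List (List Int)) (i se : Int),
    (∀ cs ∈ l, (3 : Int) ∉ cs) → pvSub l i se = se := by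
  intro l
  induction l with
  | nil => intros; rfl
  | cons cs rest ih =>
    intro i se h
    have hc : (3 : Int) ∉ cs := h cs (by simp)
    simp only [pvSub, List.contains_eq_mem, hc, decide_false, Bool.false_eq_true, if_false]
    exact ih _ _ (fun x hx => h x (by simp [hx]))

theorem pvSub_irrel : ∀ (l : List (List Int)) (i se se' : Int),
    (∃ cs ∈ l, (3 : Int) ∈ cs) → pvSub l i se = pvSub l i se' := by
  intro l
  induction l with
  | nil => intro i se se' h; simp at h
  | cons cs rest ih =>
    intro i se se' h
    by_cases hc : (3 : Int) ∈ cs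
    · simp [pvSub, hc]
    · simp only [pvSub, List.contains_eq_mem, hc, decide_false, Bool.false_eq_true, if_false]
      rcases h with ⟨x, hx, hx3⟩
      rcases List.mem_cons.mp hx with hx' | hx'
      · subst hx'; exact absurd hx3 hc
      · exact ih _ _ _ ⟨x, hx', hx3⟩

theorem pvALoop2_append_left : ∀ (a b : List (List Int)) (i n : Int),
    (∃ cs ∈ a, (3 : Int) ∈ cs) → pvALoop2 (a ++ b) i n = pvALoop2 a i n := by
  intro a
  induction a with
  | nil => intro b i n h; simp at h
  | cons cs rest ih =>
    intro b i n h
    by_cases hc : (3 : Int) ∈ cs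
    · simp [pvALoop2, hc]
    · simp only [List.cons_append, pvALoop2, List.contains_eq_mem, hc, decide_false,
        Bool.false_eq_true, if_false]
      rcases h with ⟨x, hx, hx3⟩
      rcases List.mem_cons.mp hx with hx' | hx'
      · subst hx'; exact absurd hx3 hc
      · exact ih _ _ _ ⟨x, hx', hx3⟩

theorem pvALoop2_append_right : ∀ (a b : List (List Int)) (i n : Int),
    (∀ cs ∈ a, (3 : Int) ∉ cs) → pvALoop2 (a ++ b) i n = pvALoop2 b (i + (a.length : Int)) n := by
  intro a
  induction a with
  | nil => intro b i n _; simp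
  | cons cs rest ih =>
    intro b i n h
    have hc : (3 : Int) ∉ cs := h cs (by simp)
    simp only [List.cons_append, pvALoop2, List.contains_eq_mem, hc, decide_false,
      Bool.false_eq_true, if_false]
    rw [ih _ _ _ (fun x hx => h x (by simp [hx]))]
    congr 1
    simp only [List.length_cons]
    push_cast
    ring

theorem pvSub_eq_loop2 : ∀ (l : List (List Int)) (i : Int),
    pvSub l i 0 = pvALoop2 l.reverse 0 (i + (l.length : Int)) := by
  intro l
  induction l with
  | nil => intro i; rfl
  | cons cs rest ih =>
    intro i
    have hlen : i + ((cs :: rest).length : Int) = (i + 1) + (rest.length : Int) := by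
      simp only [List.length_cons]; push_cast; ring
    by_cases hr : ∃ x ∈ rest, (3 : Int) ∈ x
    · have lhs : pvSub (cs :: rest) i 0 = pvSub rest (i + 1) 0 := by
        simp only [pvSub]; exact pvSub_irrel rest (i+1) _ 0 hr
      have hrev : ∃ x ∈ rest.reverse, (3 : Int) ∈ x := by
        rcases hr with ⟨x, hx, h3⟩; exact ⟨x, by simpa using hx, h3⟩
      rw [lhs, ih (i + 1), List.reverse_cons, pvALoop2_append_left _ _ _ _ hrev, hlen]
    · push Not at hr
      have hrev : ∀ x ∈ rest.reverse, (3 : Int) ∉ x := by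
        intro x hx; exact hr x (by simpa using hx)
      have lhs : pvSub (cs :: rest) i 0 = (if cs.contains 3 then i + 1 else 0) := by
        simp only [pvSub]; exact pvSub_none rest _ _ hr
      rw [lhs, List.reverse_cons, pvALoop2_append_right _ _ _ _ hrev, hlen]
      simp only [pvALoop2]
      by_cases hc : (3 : Int) ∈ cs <;> simp [hc]

-- ===== VERDICT (by name: the statement is the Claim_ definition above) =====
theorem define_aortic_arch_with_seg_py_spec : Claim_equal_define_aortic_arch_with_seg_py := by
  intro cpr _
  unfold Spec_define_aortic_arch_with_seg_py define_aortic_arch_with_seg_py define_aortic_arch_with_seg_py_alt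
  have h1 := pvBLoop_fst cpr 0 0
  have h2 := pvBLoop_snd cpr 0 false 0 0
  have h3 := pvSub_eq_loop2 cpr 0
  simp only [zero_add] at h3
  simp [h1, h2, h3]
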